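-- pv_equiv track=rewrite | github.com/eunwoosh/mmdetection | mmdet/models/detectors/atss.py | map_class_names
-- ===== SOURCE A (Python) =====
-- def map_class_names(src_classes, dst_classes):
--     """Computes src to dst index mapping
--
--     src2dst[src_idx] = dst_idx
--     #  according to class name matching, -1 for non-matched ones
--     assert(len(src2dst) == len(src_classes))
--     ex)
--       src_classes = ['person', 'car', 'tree']
--       dst_classes = ['tree', 'person', 'sky', 'ball']
--       -> Returns src2dst = [1, -1, 0]
--     """
--     src2dst = []
--     for src_class in src_classes:
--         if src_class in dst_classes:
--             src2dst.append(dst_classes.index(src_class))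
--         else:
--             src2dst.append(-1)
--     return src2dst
-- ===== SOURCE B (Python) =====
-- def map_class_names(src_classes, dst_classes):
--     """Computes src to dst index mapping.
--
--     Inverted index + scatter: group the positions of each src name into a
--     dict once, preallocate an all -1 mapping, then sweep dst_classes once,
--     scatter-writing each dst index into the positions of its name; popping
--     the entry keeps the first dst occurrence (matching .index)."""
--     src2dst = [-1] * len(src_classes)
--     positions = {}
--     for i, name in enumerate(src_classes):
--         positions[name] = positions.get(name, []) + [i]
--     for j, name in enumerate(dst_classes):
--         if name in positions:
--             for i in positions.pop(name):
--                 src2dst[i] = j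
--     return src2dst
-- ===== Notes on version B (the rewrite author's own statement) =====
-- stated objective: faster
-- what changed: B inverts the computation: it groups the positions of each src name into a dict in one pass, preallocates an all -1 result, then sweeps dst_classes once scatter-writing each dst index into the positions of its name (popping the entry so the first dst occurrence wins), replacing A's per-src membership test plus dst_classes.index scan.
import Mathlib
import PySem

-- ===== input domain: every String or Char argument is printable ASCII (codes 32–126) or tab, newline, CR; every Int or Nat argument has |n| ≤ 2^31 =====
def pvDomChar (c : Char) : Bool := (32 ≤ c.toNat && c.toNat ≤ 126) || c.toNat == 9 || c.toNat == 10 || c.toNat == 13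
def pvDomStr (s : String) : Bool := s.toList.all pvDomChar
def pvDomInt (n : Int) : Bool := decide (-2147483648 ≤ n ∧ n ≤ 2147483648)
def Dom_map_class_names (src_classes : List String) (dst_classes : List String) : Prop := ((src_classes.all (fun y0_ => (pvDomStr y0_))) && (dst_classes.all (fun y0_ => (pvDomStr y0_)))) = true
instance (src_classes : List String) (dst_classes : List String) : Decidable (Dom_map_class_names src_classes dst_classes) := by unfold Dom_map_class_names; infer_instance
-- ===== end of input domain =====

-- B inverts the computation: it groups the positions of each src name into a dict in one pass,
-- preallocates an all -1 result and sweeps dst_classes once, scatter-writing each dst index into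
-- the positions of its name (popping the entry so the first dst occurrence wins).

-- ===== PORT A =====
def map_class_names (src_classes : List String) (dst_classes : List String) : List Int :=
  src_classes.foldl (fun src2dst src_class =>
    if dst_classes.contains src_class then
      src2dst ++ [(((PySem.List.index? dst_classes src_class).getD 0 : Nat) : Int)]
    else
      src2dst ++ [(-1 : Int)]) []

-- ===== PORT B =====
-- the body of B's second loop: scatter the dst index into the positions of the matched name,
-- popping the dict entry (Python's `if name in positions: for i in positions.pop(name): …`)
def pvStep (st : List Int × PySem.Dict String (List Int)) (p : Int × String) :
    List Int × PySem.Dict String (List Int) :=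
  match st.2.get? p.2 with
  | some is => (is.foldl (fun a i => a.set i.toNat p.1) st.1, st.2.erase p.2)
  | none => st

def map_class_names_alt (src_classes : List String) (dst_classes : List String) : List Int :=
  let src2dst : List Int := List.replicate src_classes.length (-1)
  let positions : PySem.Dict String (List Int) :=
    (PySem.List.enumerate src_classes).foldl
      (fun d p => d.modify p.2 [] (fun l => l ++ [p.1])) PySem.Dict.empty
  ((PySem.List.enumerate dst_classes).foldl pvStep (src2dst, positions)).1

-- ===== PRECONDITION & SPEC =====
def Spec_map_class_names (src_classes : List String) (dst_classes : List String) (out : List Int) : Prop := out = map_class_names_alt src_classes dst_classes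
instance (src_classes : List String) (dst_classes : List String) (out : List Int) : Decidable (Spec_map_class_names src_classes dst_classes out) := by unfold Spec_map_class_names; infer_instance

-- ===== CLAIM (what is proved, stated in full; the proofs are below) =====
def Claim_equal_map_class_names : Prop := ∀ (src_classes : List String) (dst_classes : List String), Dom_map_class_names src_classes dst_classes → Spec_map_class_names src_classes dst_classes (map_class_names src_classes dst_classes)

-- ===== LEMMAS AND PROOFS =====

-- A's per-name result.
def pvA_f (dst_classes : List String) (s : String) : Int :=
  if dst_classes.contains s then (((PySem.List.index? dst_classes s).getD 0 : Nat) : Int) else -1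

theorem pvA_foldl (dst_classes : List String) :
    ∀ (src : List String) (acc : List Int),
      src.foldl (fun src2dst src_class =>
        if dst_classes.contains src_class then
          src2dst ++ [(((PySem.List.index? dst_classes src_class).getD 0 : Nat) : Int)]
        else
          src2dst ++ [(-1 : Int)]) acc = acc ++ src.map (pvA_f dst_classes) := by
  intro src
  induction src with
  | nil => intro acc; simp
  | cons x xs ih =>
    intro acc
    rw [List.foldl_cons, ih]
    split_ifs with h <;> simp [pvA_f] <;> simp_all

-- the positions of a name in src, as the dict stores them
def pvIdxs (src : List String) (s : String) : List Int :=
  (((PySem.List.enumerate src).map Prod.swap).filter (fun q => q.1 == s)).map (·.2)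

theorem pv_positions_getD (src : List String) (s : String) :
    ((PySem.List.enumerate src).foldl
      (fun d p => d.modify p.2 [] (fun l => l ++ [p.1])) PySem.Dict.empty).getD s []
    = pvIdxs src s := by
  have h := PySem.Dict.getD_foldl_modify_append
    ((PySem.List.enumerate src).map Prod.swap) PySem.Dict.empty s
  rw [List.foldl_map] at h
  simpa [pvIdxs] using h

theorem pv_mem_pvIdxs (src : List String) (s : String) (i : Int) :
    i ∈ pvIdxs src s ↔ ∃ t : Nat, src[t]? = some s ∧ i = (t : Int) := by
  simp only [pvIdxs, List.mem_map, List.mem_filter, PySem.List.mem_enumerate_iff]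
  constructor
  · rintro ⟨q, ⟨⟨p, ⟨t, ht, rfl⟩, rfl⟩, hq⟩, rfl⟩
    refine ⟨t, ?_, by simp⟩
    simp only [Prod.swap] at hq
    have : src[t] = s := by simpa using hq
    simp [List.getElem?_eq_getElem ht, this]
  · rintro ⟨t, hts, rfl⟩
    have ht : t < src.length := (List.getElem?_eq_some_iff.mp hts).1
    refine ⟨((src[t] : String), (t : Int)), ⟨⟨((t : Int), src[t]), ⟨t, ht, by simp⟩, rfl⟩, ?_⟩, rfl⟩
    have : src[t] = s := by
      have := List.getElem?_eq_getElem ht (l := src)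
      rw [hts] at this; exact (Option.some_inj.mp this.symm)
    simp [this]

-- Dict.erase lookups (proved from the transparent definitions)
theorem pv_find_filter {ν : Type} (k k' : String) (h : k' ≠ k) :
    ∀ (l : List (String × ν)),
      (l.filter (fun p => !(p.1 == k))).find? (fun p => p.1 == k') = l.find? (fun p => p.1 == k') := by
  intro l
  induction l with
  | nil => rfl
  | cons p rest ih =>
    by_cases hp : p.1 = k
    · rw [List.filter_cons_of_neg (by simp [hp]),
        List.find?_cons_of_neg (by simp [hp, Ne.symm h]), ih]
    · by_cases hq : p.1 = k'
      · rw [List.filter_cons_of_pos (by simp [hp]),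
          List.find?_cons_of_pos (by simp [hq]), List.find?_cons_of_pos (by simp [hq])]
      · rw [List.filter_cons_of_pos (by simp [hp]),
          List.find?_cons_of_neg (by simp [hq]), List.find?_cons_of_neg (by simp [hq]), ih]

theorem pv_get?_erase_of_ne {ν : Type} (d : PySem.Dict String ν) (k k' : String) (h : k' ≠ k) :
    (d.erase k).get? k' = d.get? k' := by
  obtain ⟨items⟩ := d
  simp only [PySem.Dict.erase, PySem.Dict.get?]
  rw [pv_find_filter k k' h items]

theorem pv_get?_erase_self {ν : Type} (d : PySem.Dict String ν) (k : String) :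
    (d.erase k).get? k = none := by
  obtain ⟨items⟩ := d
  simp only [PySem.Dict.erase, PySem.Dict.get?]
  rw [List.find?_eq_none.mpr]
  · rfl
  · intro x hx
    have := (List.mem_filter.mp hx).2
    simpa using this

-- the scatter loop: pointwise description and length
theorem pv_scatter (j : Int) :
    ∀ (is : List Int) (a : List Int) (t : Nat),
      (is.foldl (fun a i => a.set i.toNat j) a)[t]? =
        if (∃ i ∈ is, i.toNat = t) ∧ t < a.length then some j else a[t]? := by
  intro is
  induction is with
  | nil => intro a t; simp
  | cons i is' ih =>
    intro a t
    rw [List.foldl_cons, ih, List.length_set, List.getElem?_set]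
    have hcons : (∃ x ∈ i :: is', x.toNat = t) ↔ (i.toNat = t ∨ ∃ x ∈ is', x.toNat = t) := by
      simp only [List.mem_cons]
      constructor
      · rintro ⟨x, hx | hx, hxt⟩
        · left; rw [← hx]; exact hxt
        · right; exact ⟨x, hx, hxt⟩
      · rintro (hit | ⟨x, hx, hxt⟩)
        · exact ⟨i, Or.inl rfl, hit⟩
        · exact ⟨x, Or.inr hx, hxt⟩
    by_cases hlt : t < a.length
    · by_cases hex : ∃ x ∈ is', x.toNat = t
      · simp [hex, hlt]
      · by_cases hit : i.toNat = t
        · simp [hex, hit, hlt]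
        · simp [hex, hit]
    · have hnone : a[t]? = none := List.getElem?_eq_none (by omega)
      by_cases hex : ∃ x ∈ is', x.toNat = t
      · simp only [hcons, hex, hlt, and_false, if_false, hnone]
        by_cases hit : i.toNat = t
        · simp [hit]; omega
        · simp [hit]
      · by_cases hit : i.toNat = t
        · simp [hex, hit, hlt]
        · simp [hex, hit, hlt]

theorem pv_scatter_len (j : Int) :
    ∀ (is : List Int) (a : List Int),
      (is.foldl (fun a i => a.set i.toNat j) a).length = a.length := by
  intro is
  induction is with
  | nil => intro a; rfl
  | cons i is' ih => intro a; rw [List.foldl_cons, ih, List.length_set]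

theorem pv_fold2_len (dst : List String) :
    ∀ (k : Int) (arr : List Int) (pd : PySem.Dict String (List Int)),
      (((PySem.List.enumerate dst k).foldl pvStep (arr, pd)).1).length = arr.length := by
  induction dst with
  | nil => intro k arr pd; simp [PySem.List.enumerate_nil]
  | cons x xs ih =>
    intro k arr pd
    rw [PySem.List.enumerate_cons, List.foldl_cons]
    cases h : pd.get? x with
    | some is =>
      simp only [pvStep, h]
      rw [ih]
      exact pv_scatter_len k is arr
    | none => simp only [pvStep, h]; exact ih (k+1) arr pd

-- main invariant: the second fold writes, at each slot, the first dst index of that slot's name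
theorem pv_fold2 (src : List String) :
    ∀ (dst : List String) (k : Int) (arr : List Int) (pd : PySem.Dict String (List Int)),
      arr.length = src.length →
      (∀ s l, pd.get? s = some l → l = pvIdxs src s) →
      ∀ (t : Nat) (s : String), src[t]? = some s →
        (((PySem.List.enumerate dst k).foldl pvStep (arr, pd)).1)[t]? =
          if pd.contains s then
            (match PySem.List.index? dst s with
             | some i => some (k + (i : Int))
             | none => arr[t]?)
          else arr[t]? := by
  intro dst
  induction dst with
  | nil =>
    intro k arr pd hlen hpd t s hts
    simp [PySem.List.enumerate_nil, PySem.List.index?]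
  | cons x xs ih =>
    intro k arr pd hlen hpd t s hts
    have htlt : t < src.length := (List.getElem?_eq_some_iff.mp hts).1
    rw [PySem.List.enumerate_cons, List.foldl_cons]
    cases h : pd.get? x with
    | some is =>
      have his : is = pvIdxs src x := hpd x is h
      simp only [pvStep, h]
      have hpd1 : ∀ s' l, (pd.erase x).get? s' = some l → l = pvIdxs src s' := by
        intro s' l hl
        by_cases hs' : s' = x
        · rw [hs', pv_get?_erase_self] at hl; cases hl
        · rw [pv_get?_erase_of_ne pd x s' hs'] at hl; exact hpd s' l hl
      have hlen1 : (is.foldl (fun a i => a.set i.toNat k) arr).length = src.length := by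
        rw [pv_scatter_len]; exact hlen
      rw [ih (k+1) _ _ hlen1 hpd1 t s hts]
      by_cases hsx : s = x
      · subst hsx
        have hc1 : (pd.erase s).contains s = false := by
          rw [PySem.Dict.contains_eq_isSome_get?, pv_get?_erase_self]; rfl
        have hc : pd.contains s = true := by
          rw [PySem.Dict.contains_eq_isSome_get?, h]; rfl
        rw [hc1, hc]
        simp only [Bool.false_eq_true, if_false, if_true]
        rw [PySem.List.index?_cons_self]
        rw [pv_scatter]
        have hmem : ((t : Int)) ∈ is := by
          rw [his, pv_mem_pvIdxs]; exact ⟨t, hts, rfl⟩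
        have : (∃ i ∈ is, i.toNat = t) ∧ t < arr.length := by
          refine ⟨⟨(t : Int), hmem, by simp⟩, by omega⟩
        rw [if_pos this]
        simp
      · have hc1 : (pd.erase x).contains s = pd.contains s := by
          rw [PySem.Dict.contains_eq_isSome_get?, PySem.Dict.contains_eq_isSome_get?,
            pv_get?_erase_of_ne pd x s hsx]
        rw [hc1]
        have harr : (is.foldl (fun a i => a.set i.toNat k) arr)[t]? = arr[t]? := by
          rw [pv_scatter]
          rw [if_neg]
          rintro ⟨⟨i, hi, hit⟩, -⟩
          rw [his, pv_mem_pvIdxs] at hi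
          obtain ⟨t', ht', rfl⟩ := hi
          have htt : t' = t := by simpa using hit
          subst htt
          rw [hts] at ht'
          exact hsx (Option.some_inj.mp ht')
        rw [PySem.List.index?_cons_of_ne xs (show x ≠ s from fun hh => hsx hh.symm)]
        cases hi : PySem.List.index? xs s with
        | none => simp [harr]
        | some i =>
          simp only [Option.map_some]
          by_cases hc : pd.contains s
          · rw [if_pos hc, if_pos hc]
            show some (k + 1 + (i : Int)) = some (k + ((i + 1 : Nat) : Int))
            congr 1
            push_cast
            ring
          · simp only [hc, if_false, Bool.false_eq_true]
            exact harr
    | none =>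
      simp only [pvStep, h]
      rw [ih (k+1) arr pd hlen hpd t s hts]
      by_cases hsx : s = x
      · have hc : pd.contains s = false := by
          rw [PySem.Dict.contains_eq_isSome_get?, hsx, h]; rfl
        simp [hc]
      · rw [PySem.List.index?_cons_of_ne xs (show x ≠ s from fun hh => hsx hh.symm)]
        cases hi : PySem.List.index? xs s with
        | none => simp
        | some i =>
          simp only [Option.map_some]
          by_cases hc : pd.contains s
          · rw [if_pos hc, if_pos hc]
            show some (k + 1 + (i : Int)) = some (k + ((i + 1 : Nat) : Int))
            congr 1
            push_cast
            ring
          · simp [hc]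

-- the positions dict contains exactly the names of src
theorem pv_pd0_contains (src : List String) (s : String) :
    ((PySem.List.enumerate src).foldl
      (fun d p => d.modify p.2 [] (fun l => l ++ [p.1])) PySem.Dict.empty).contains s = true
      ↔ s ∈ src := by
  rw [PySem.Dict.contains_iff_mem_keys]
  rw [PySem.Dict.keys_foldl_modify_key (PySem.List.enumerate src) (fun p => p.2) []
    (fun _ p => (fun l => l ++ [p.1]))]
  rw [PySem.Dict.keys_empty, PySem.Set.mem_update, PySem.List.map_snd_enumerate]
  simp

-- ===== VERDICT (by name: the statement is the Claim_ definition above) =====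
theorem map_class_names_spec : Claim_equal_map_class_names := by
  intro src dst _
  show map_class_names src dst = map_class_names_alt src dst
  unfold map_class_names map_class_names_alt
  rw [pvA_foldl dst src []]
  simp only [List.nil_append]
  apply List.ext_getElem?
  intro t
  set pd0 := (PySem.List.enumerate src).foldl
      (fun d p => d.modify p.2 [] (fun l => l ++ [p.1])) PySem.Dict.empty with hpd0
  have hpd : ∀ s l, pd0.get? s = some l → l = pvIdxs src s := by
    intro s l hl
    have := PySem.Dict.getD_of_get?_eq_some pd0 ([] : List Int) hl
    rw [← this, hpd0]
    exact (pv_positions_getD src s).symm ▸ rfl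
  by_cases ht : t < src.length
  · have hts : src[t]? = some src[t] := List.getElem?_eq_getElem ht
    rw [pv_fold2 src dst 0 _ pd0 (by simp) hpd t src[t] hts]
    have hc : pd0.contains src[t] = true := (pv_pd0_contains src src[t]).mpr (by simp [List.getElem_mem])
    rw [if_pos hc]
    rw [List.getElem?_map, hts]
    unfold pvA_f
    cases hi : PySem.List.index? dst src[t] with
    | none =>
      have hmem : src[t] ∉ dst := (PySem.List.index?_eq_none_iff dst src[t]).mp hi
      simp [hmem, ht]
    | some i =>
      have hmem : src[t] ∈ dst := (PySem.List.index?_isSome_iff dst src[t]).mp (by rw [hi]; rfl)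
      rw [PySem.List.index?_eq_idxOf?] at hi
      simp [hmem, hi]
  · have h1 : (src.map (pvA_f dst))[t]? = none := by
      rw [List.getElem?_eq_none]; simpa using le_of_not_gt ht
    have h2 : (((PySem.List.enumerate dst).foldl pvStep
        (List.replicate src.length (-1), pd0)).1)[t]? = none := by
      rw [List.getElem?_eq_none]
      rw [pv_fold2_len]
      simpa using le_of_not_gt ht
    rw [h1, h2]
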